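-- pv_equiv track=rewrite | github.com/SCHVRevan/Methods_of_cryptographic_information_protection | Lab2-Feistel-linear/createEquation.py | koef_equ1
-- ===== SOURCE A (Python) =====
-- EX_PERMUTATION = [3, 4, 1, 2, 6, 8, 5, 7, 3, 8, 2, 4]
--
-- PERMUTATION = [7, 4, 3, 6, 5, 8, 2, 1]
--
-- def koef_equ1(sbox_equ):
--     list_equ = []
--
--     x = [0] * 16
--     y = [0] * 16
--     key = [0] * 4
--     for i in range(len(sbox_equ)):
--         for k in range(len(sbox_equ[i][0])):
--             if sbox_equ[i][0][k] == "1":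
--                 index_X = EX_PERMUTATION[k] + 8
--                 x[index_X] = 1
--                 key[k] = 1
--         for k in range(len(sbox_equ[i][1]) - 1):
--             if sbox_equ[i][1][k + 1] == "1":
--                 index_Y = PERMUTATION[k]
--                 y[index_Y] = 1
--
--         list_equ.append([x.copy(), y.copy(), key.copy()])
--         x = [0] * 16
--         y = [0] * 16
--         key = [0] * 4
--
--     for i in range(len(list_equ)):
--         for k in range(len(list_equ[i][0])):
--             if list_equ[i][1][k] == 1:
--                 list_equ[i][0][k] = 1
--
--     return list_equ
-- ===== SOURCE B (Python) =====
-- EX_PERMUTATION = [3, 4, 1, 2, 6, 8, 5, 7, 3, 8, 2, 4]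
--
-- PERMUTATION = [7, 4, 3, 6, 5, 8, 2, 1]
--
-- def koef_equ1(sbox_equ):
--     # One pass per row: build the index sets first, then emit each 0/1 vector
--     # directly, folding A's separate x-patching pass into the construction of x.
--     out = []
--     for row in sbox_equ:
--         ones0 = [k for k in range(len(row[0])) if row[0][k] == "1"]
--         ypos = [PERMUTATION[k - 1] for k in range(1, len(row[1])) if row[1][k] == "1"]
--         xd = [EX_PERMUTATION[k] + 8 for k in ones0]
--         x = [1 if (j in ypos or j in xd) else 0 for j in range(16)]
--         y = [1 if j in ypos else 0 for j in range(16)]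
--         key = [1 if j in ones0 else 0 for j in range(4)]
--         out.append([x, y, key])
--     return out
-- ===== Notes on version B (the rewrite author's own statement) =====
-- stated objective: alternative
-- what changed: Instead of A's mutate-arrays-in-a-loop plus a separate second pass over the whole result list to patch x from y, B computes per row the index lists (ones0, ypos, xd) once and emits each 0/1 vector directly by membership, folding the x-patch into the construction of x, in a single pass.
import Mathlib
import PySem

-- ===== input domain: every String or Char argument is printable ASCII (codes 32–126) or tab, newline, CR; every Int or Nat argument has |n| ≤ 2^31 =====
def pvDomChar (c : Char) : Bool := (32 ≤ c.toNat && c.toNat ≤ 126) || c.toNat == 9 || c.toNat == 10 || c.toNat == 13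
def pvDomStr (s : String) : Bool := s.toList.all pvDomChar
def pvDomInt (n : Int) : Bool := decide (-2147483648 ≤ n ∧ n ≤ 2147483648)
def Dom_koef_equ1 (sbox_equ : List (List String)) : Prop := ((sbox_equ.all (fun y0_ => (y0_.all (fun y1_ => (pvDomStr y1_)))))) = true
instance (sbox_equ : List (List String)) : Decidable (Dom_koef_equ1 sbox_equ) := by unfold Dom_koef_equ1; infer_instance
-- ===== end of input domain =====

-- B builds each output row directly from index sets in one pass, folding A's
-- separate x-patch pass into the construction of x (objective: alternative decomposition).

def EX_PERMUTATION : List Nat := [3, 4, 1, 2, 6, 8, 5, 7, 3, 8, 2, 4]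

def PERMUTATION : List Nat := [7, 4, 3, 6, 5, 8, 2, 1]

-- ===== PORT A =====
-- first for-loop body of A: build [x, y, key] for one row
def aRow (row : List String) : List (List Int) :=
  let s0 := (row.getD 0 "").toList
  let s1 := (row.getD 1 "").toList
  let xkey := (List.range s0.length).foldl
      (fun (p : List Int × List Int) k =>
        if s0.getD k ' ' == '1' then
          (p.1.set (EX_PERMUTATION.getD k 0 + 8) 1, p.2.set k 1)
        else p)
      (List.replicate 16 0, List.replicate 4 0)
  let y := (List.range (s1.length - 1)).foldl
      (fun y k => if s1.getD (k + 1) ' ' == '1' then y.set (PERMUTATION.getD k 0) 1 else y)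
      (List.replicate 16 0)
  [xkey.1, y, xkey.2]

-- second for-loop body of A: patch x in place from y
def aPatch (eq : List (List Int)) : List (List Int) :=
  let x := eq.getD 0 []
  let y := eq.getD 1 []
  let key := eq.getD 2 []
  [(List.range x.length).foldl (fun x k => if y.getD k 0 == 1 then x.set k 1 else x) x, y, key]

def koef_equ1 (sbox_equ : List (List String)) : List (List (List Int)) :=
  (sbox_equ.foldl (fun acc row => acc ++ [aRow row]) []).map aPatch

-- ===== PORT B =====
def bRow (row : List String) : List (List Int) :=
  let s0 := (row.getD 0 "").toList
  let s1 := (row.getD 1 "").toList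
  let ones0 := (List.range s0.length).filter (fun k => s0.getD k ' ' == '1')
  let ypos := ((List.range' 1 (s1.length - 1)).filter (fun k => s1.getD k ' ' == '1')).map
      (fun k => PERMUTATION.getD (k - 1) 0)
  let xd := ones0.map (fun k => EX_PERMUTATION.getD k 0 + 8)
  [ (List.range 16).map (fun j => if j ∈ ypos ∨ j ∈ xd then (1 : Int) else 0),
    (List.range 16).map (fun j => if j ∈ ypos then (1 : Int) else 0),
    (List.range 4).map (fun j => if j ∈ ones0 then (1 : Int) else 0) ]

def koef_equ1_alt (sbox_equ : List (List String)) : List (List (List Int)) :=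
  sbox_equ.map bRow

-- ===== PRECONDITION & SPEC =====
-- Pre_ is exactly the set of inputs on which Python A returns (A raises IndexError
-- when a row has fewer than two strings, when row[0] has a "1" at position ≥ 4, or
-- when row[1] has a "1" at position ≥ 9).
def Pre_koef_equ1 (sbox_equ : List (List String)) : Prop :=
  ∀ row ∈ sbox_equ, 2 ≤ row.length ∧
    '1' ∉ ((row.getD 0 "").toList.drop 4) ∧ '1' ∉ ((row.getD 1 "").toList.drop 9)
instance (sbox_equ : List (List String)) : Decidable (Pre_koef_equ1 sbox_equ) := by
  unfold Pre_koef_equ1; infer_instance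

def pvWitness_koef_equ1 : List (List String) := [["1010", "01100100"]]

def Spec_koef_equ1 (sbox_equ : List (List String)) (out : List (List (List Int))) : Prop :=
  out = koef_equ1_alt sbox_equ
instance (sbox_equ : List (List String)) (out : List (List (List Int))) : Decidable (Spec_koef_equ1 sbox_equ out) := by
  unfold Spec_koef_equ1; infer_instance

-- ===== CLAIM (what is proved, stated in full; the proofs are below) =====
def Claim_equal_koef_equ1 : Prop := ∀ (sbox_equ : List (List String)), Dom_koef_equ1 sbox_equ → Pre_koef_equ1 sbox_equ → Spec_koef_equ1 sbox_equ (koef_equ1 sbox_equ)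

-- ===== LEMMAS AND PROOFS =====

lemma repl_eq (n : Nat) :
    List.replicate n (0 : Int) = (List.range n).map (fun j => if (fun (_ : Nat) => false) j then (1 : Int) else 0) := by
  simp

lemma set_map_range (n : Nat) (p : Nat → Bool) (i : Nat) (_hi : i < n) :
    ((List.range n).map (fun j => if p j then (1 : Int) else 0)).set i 1
    = (List.range n).map (fun j => if (p j || (i == j)) then (1 : Int) else 0) := by
  apply List.ext_getElem
  · simp
  · intro j hj hj'
    simp only [List.getElem_set, List.getElem_map, List.getElem_range] at *
    by_cases hij : i = j
    · simp [hij]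
    · simp [hij]

lemma foldl_set_ones {α : Type} (ks : List α) (c : α → Bool) (t : α → Nat) (n : Nat) (p : Nat → Bool)
    (h : ∀ k ∈ ks, c k = true → t k < n) :
    ks.foldl (fun x k => if c k then x.set (t k) 1 else x)
      ((List.range n).map (fun j => if p j then (1 : Int) else 0))
    = (List.range n).map (fun j => if (p j || ks.any (fun k => c k && (t k == j))) then (1 : Int) else 0) := by
  induction ks generalizing p with
  | nil => simp
  | cons k ks ih =>
      simp only [List.foldl_cons, List.any_cons]
      obtain hc | hc := Bool.eq_false_or_eq_true (c k)
      · rw [if_pos hc, set_map_range n p (t k) (h k List.mem_cons_self hc)]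
        rw [ih _ (fun k hk => h k (List.mem_cons_of_mem _ hk))]
        simp [hc, Bool.or_assoc]
      · rw [if_neg (by simp [hc])]
        rw [ih _ (fun k hk => h k (List.mem_cons_of_mem _ hk))]
        simp [hc]

lemma foldl_pair_split {α β γ : Type} (ks : List α) (c : α → Bool) (f : β → α → β) (g : γ → α → γ) (a : β) (b : γ) :
    ks.foldl (fun p k => if c k then (f p.1 k, g p.2 k) else p) (a, b)
    = (ks.foldl (fun x k => if c k then f x k else x) a,
       ks.foldl (fun x k => if c k then g x k else x) b) := by
  induction ks generalizing a b with
  | nil => rfl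
  | cons k ks ih =>
      simp only [List.foldl_cons]
      cases c k
      · simp only [Bool.false_eq_true, if_false]
        exact ih _ _
      · simp only [if_true]
        exact ih _ _


lemma any_range_eq (n j : Nat) (q : Nat → Bool) (hj : j < n) :
    ((List.range n).any fun k => q k && (k == j)) = q j := by
  apply Bool.eq_iff_iff.mpr
  simp only [List.any_eq_true, List.mem_range, Bool.and_eq_true, beq_iff_eq]
  constructor
  · rintro ⟨k, _, hq, rfl⟩; exact hq
  · intro hq; exact ⟨j, hj, hq, rfl⟩

lemma getD_map_range' (n j : Nat) (f : Nat → Int) (d : Int) (hj : j < n) :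
    (((List.range n).map f).getD j d) = f j := by
  rw [List.getD_eq_getElem?_getD]
  simp [hj]

lemma perm_lt (k : Nat) : PERMUTATION.getD k 0 < 16 := by
  by_cases hk : k < 8
  · interval_cases k <;> decide
  · rw [List.getD_eq_default _ _ (by simp [PERMUTATION]; omega)]; omega

lemma aPatch_cons (x y k : List Int) :
    aPatch [x, y, k]
    = [(List.range x.length).foldl (fun x j => if y.getD j 0 == 1 then x.set j 1 else x) x, y, k] := rfl

lemma patch_eq (px py : Nat → Bool) :
    (List.range ((List.range 16).map (fun j => if px j then (1 : Int) else 0)).length).foldl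
      (fun x k => if ((List.range 16).map (fun j => if py j then (1 : Int) else 0)).getD k 0 == 1 then x.set k 1 else x)
      ((List.range 16).map (fun j => if px j then (1 : Int) else 0))
    = (List.range 16).map (fun j => if (px j || py j) then (1 : Int) else 0) := by
  simp only [List.length_map, List.length_range]
  rw [foldl_set_ones (List.range 16)
        (fun k => ((List.range 16).map (fun j => if py j then (1 : Int) else 0)).getD k 0 == 1)
        (fun k => k) 16 px (fun k hk _ => List.mem_range.mp hk)]
  apply List.map_congr_left
  intro j hj
  rw [List.mem_range] at hj
  refine if_congr ?_ rfl rfl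
  rw [any_range_eq 16 j _ hj, getD_map_range' 16 j _ 0 hj]
  cases py j
  · simp
  · simp


lemma ypos_iff (s1 : List Char) (j : Nat) :
    (((List.range (s1.length - 1)).any fun k => s1.getD (k + 1) ' ' == '1' && PERMUTATION.getD k 0 == j) = true)
    ↔ j ∈ (List.filter (fun k => s1.getD k ' ' == '1') (List.range' 1 (s1.length - 1))).map
        (fun k => PERMUTATION.getD (k - 1) 0) := by
  simp only [List.any_eq_true, List.mem_range, Bool.and_eq_true, beq_iff_eq, List.mem_map,
    List.mem_filter, List.mem_range'_1]
  constructor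
  · rintro ⟨k, hk, hc, rfl⟩
    exact ⟨k + 1, ⟨⟨by omega, by omega⟩, by simpa using hc⟩, by simp⟩
  · rintro ⟨a, ⟨⟨ha1, ha2⟩, hc⟩, rfl⟩
    exact ⟨a - 1, by omega, by rw [Nat.sub_add_cancel ha1]; simpa using hc, rfl⟩

lemma ones_iff (s0 : List Char) (j : Nat) :
    (((List.range s0.length).any fun k => s0.getD k ' ' == '1' && k == j) = true)
    ↔ j ∈ List.filter (fun k => s0.getD k ' ' == '1') (List.range s0.length) := by
  simp only [List.any_eq_true, List.mem_range, Bool.and_eq_true, beq_iff_eq, List.mem_filter]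
  constructor
  · rintro ⟨k, hk, hc, rfl⟩; exact ⟨hk, by simpa using hc⟩
  · rintro ⟨hj, hc⟩; exact ⟨j, hj, by simpa using hc, rfl⟩

lemma xd_iff (s0 : List Char) (j : Nat) :
    (((List.range s0.length).any fun k => s0.getD k ' ' == '1' && EX_PERMUTATION.getD k 0 + 8 == j) = true)
    ↔ j ∈ (List.filter (fun k => s0.getD k ' ' == '1') (List.range s0.length)).map
        (fun k => EX_PERMUTATION.getD k 0 + 8) := by
  simp only [List.any_eq_true, List.mem_range, Bool.and_eq_true, beq_iff_eq, List.mem_map,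
    List.mem_filter]
  constructor
  · rintro ⟨k, hk, hc, rfl⟩; exact ⟨k, ⟨hk, by simpa using hc⟩, rfl⟩
  · rintro ⟨k, ⟨hk, hc⟩, rfl⟩; exact ⟨k, hk, by simpa using hc, rfl⟩

lemma rowEq (row : List String)
    (h0 : '1' ∉ ((row.getD 0 "").toList.drop 4))
    (_h1 : '1' ∉ ((row.getD 1 "").toList.drop 9)) :
    aPatch (aRow row) = bRow row := by
  unfold aRow bRow
  generalize hs0 : (row.getD 0 "").toList = s0 at h0 ⊢
  generalize hs1 : (row.getD 1 "").toList = s1 at _h1 ⊢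
  dsimp only
  have h0' : ∀ k, k < s0.length → s0.getD k ' ' = '1' → k < 4 := by
    intro k hk hc
    by_contra hge
    apply h0
    rw [List.getD_eq_getElem _ _ hk] at hc
    rw [← hc]
    rw [List.mem_iff_getElem]
    refine ⟨k - 4, by simp; omega, ?_⟩
    rw [List.getElem_drop]
    congr 1
    omega
  rw [foldl_pair_split (List.range s0.length) (fun k => s0.getD k ' ' == '1')
        (fun (x : List Int) k => x.set (EX_PERMUTATION.getD k 0 + 8) 1) (fun (x : List Int) k => x.set k 1)
        (List.replicate 16 0) (List.replicate 4 0)]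
  rw [repl_eq 16, repl_eq 4]
  rw [foldl_set_ones (List.range s0.length) (fun k => s0.getD k ' ' == '1')
        (fun k => EX_PERMUTATION.getD k 0 + 8) 16 _
        (by intro k hk hc
            have h4 := h0' k (List.mem_range.mp hk) (by simpa using hc)
            interval_cases k <;> decide)]
  rw [foldl_set_ones (List.range s0.length) (fun k => s0.getD k ' ' == '1')
        (fun k => k) 4 _
        (fun k hk hc => h0' k (List.mem_range.mp hk) (by simpa using hc))]
  rw [foldl_set_ones (List.range (s1.length - 1)) (fun k => s1.getD (k + 1) ' ' == '1')
        (fun k => PERMUTATION.getD k 0) 16 _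
        (fun k _ _ => perm_lt k)]
  rw [aPatch_cons, patch_eq]
  refine List.cons_eq_cons.mpr ⟨?_, List.cons_eq_cons.mpr ⟨?_, List.cons_eq_cons.mpr ⟨?_, rfl⟩⟩⟩
  · apply List.map_congr_left
    intro j hj
    refine if_congr ?_ rfl rfl
    simp only [Bool.false_or, Bool.or_eq_true]
    rw [xd_iff, ypos_iff]
    exact or_comm
  · apply List.map_congr_left
    intro j hj
    refine if_congr ?_ rfl rfl
    simp only [Bool.false_or]
    exact ypos_iff s1 j
  · apply List.map_congr_left
    intro j hj
    refine if_congr ?_ rfl rfl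
    simp only [Bool.false_or]
    exact ones_iff s0 j

-- ===== VERDICT (by name: the statement is the Claim_ definition above) =====
theorem koef_equ1_spec : Claim_equal_koef_equ1 := by
  intro sbox _ hpre
  unfold Spec_koef_equ1 koef_equ1 koef_equ1_alt
  rw [PySem.List.foldl_append_singleton_eq_map, List.nil_append, List.map_map]
  exact List.map_congr_left (fun row hrow => rowEq row (hpre row hrow).2.1 (hpre row hrow).2.2)
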